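-- pv_equiv track=rewrite | github.com/actions-marketplace-validations/Gsbreddy_notebooklens | scripts/validate_docs.py | _iter_non_fenced_lines
-- ===== SOURCE A (Python) =====
-- def _iter_non_fenced_lines(text: str) -> list[tuple[int, str]]:
--     lines: list[tuple[int, str]] = []
--     in_fence = False
--     for index, line in enumerate(text.splitlines(), start=1):
--         stripped = line.strip()
--         if stripped.startswith("```"):
--             in_fence = not in_fence
--             continue
--         if in_fence:
--             continue
--         lines.append((index, line))
--     return lines
-- ===== SOURCE B (Python) =====
-- from itertools import accumulate
--
--
-- def _iter_non_fenced_lines(text: str) -> list[tuple[int, str]]: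
--     lines = text.splitlines()
--     mask = [line.strip().startswith("```") for line in lines]
--     before = accumulate(mask, initial=0)
--     return [
--         pair
--         for pair, is_marker, markers_before in zip(enumerate(lines, 1), mask, before)
--         if not is_marker and markers_before % 2 == 0
--     ]
-- ===== Notes on version B (the rewrite author's own statement) =====
-- stated objective: alternative
-- what changed: Replaced the stateful fence-toggling loop by a precomputed marker mask plus a running marker-count table (itertools.accumulate), then a single filtering comprehension keeping non-marker lines with an even number of markers before them.
import Mathlib
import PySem

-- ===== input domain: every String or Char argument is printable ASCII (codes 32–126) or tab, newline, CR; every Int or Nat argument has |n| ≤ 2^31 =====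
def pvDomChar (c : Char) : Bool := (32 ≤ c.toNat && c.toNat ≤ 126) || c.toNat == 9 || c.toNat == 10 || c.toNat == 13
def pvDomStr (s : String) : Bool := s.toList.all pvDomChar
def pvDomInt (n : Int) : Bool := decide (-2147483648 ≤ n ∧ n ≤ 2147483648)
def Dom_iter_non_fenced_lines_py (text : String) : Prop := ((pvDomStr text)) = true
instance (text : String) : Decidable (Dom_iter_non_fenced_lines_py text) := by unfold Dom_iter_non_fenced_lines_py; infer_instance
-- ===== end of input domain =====

-- B replaces A's stateful fence-toggling loop by a precomputed marker mask plus a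
-- running marker-count table, then one filtering pass (alternative decomposition, same cost).

-- ===== PORT A =====
-- literal port of the loop: state = (in_fence, lines accumulated so far)
def iter_non_fenced_lines_py (text : String) : List (Int × String) :=
  ((PySem.List.enumerate (PySem.Str.splitlines text) 1).foldl
    (fun (st : Bool × List (Int × String)) p =>
      let stripped := PySem.Str.strip p.2
      if PySem.Str.startswith stripped "```" then (!st.1, st.2)
      else if st.1 then st
      else (st.1, st.2 ++ [p]))
    (false, [])).2

-- ===== PORT B =====
-- keep a (pair, is_marker, markers_before) triple iff not a marker and even count before
def pvKeep (t : (Int × String) × Bool × Nat) : Option (Int × String) :=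
  if !t.2.1 && t.2.2 % 2 == 0 then some t.1 else none

def iter_non_fenced_lines_py_alt (text : String) : List (Int × String) :=
  let lines := PySem.Str.splitlines text
  let mask := lines.map (fun l => PySem.Str.startswith (PySem.Str.strip l) "```")
  let before := mask.scanl (fun n b => n + (if b then 1 else 0)) 0
  ((PySem.List.enumerate lines 1).zip (mask.zip before)).filterMap pvKeep

-- ===== PRECONDITION & SPEC =====
def Spec_iter_non_fenced_lines_py (text : String) (out : List (Int × String)) : Prop := out = iter_non_fenced_lines_py_alt text
instance (text : String) (out : List (Int × String)) : Decidable (Spec_iter_non_fenced_lines_py text out) := by unfold Spec_iter_non_fenced_lines_py; infer_instance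

-- ===== CLAIM (what is proved, stated in full; the proofs are below) =====
def Claim_equal_iter_non_fenced_lines_py : Prop := ∀ (text : String), Dom_iter_non_fenced_lines_py text → Spec_iter_non_fenced_lines_py text (iter_non_fenced_lines_py text)

-- ===== LEMMAS AND PROOFS =====

lemma pv_parity (c : Nat) : (((c + 1) % 2 == 1) : Bool) = !(c % 2 == 1) := by
  rcases Nat.mod_two_eq_zero_or_one c with h | h <;> simp [Nat.add_mod, h]

lemma pv_core : ∀ (ls : List String) (i : Int) (c : Nat) (acc : List (Int × String)),
    ((PySem.List.enumerate ls i).foldl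
      (fun (st : Bool × List (Int × String)) p =>
        let stripped := PySem.Str.strip p.2
        if PySem.Str.startswith stripped "```" then (!st.1, st.2)
        else if st.1 then st
        else (st.1, st.2 ++ [p]))
      ((c % 2 == 1), acc)).2
    = acc ++ ((PySem.List.enumerate ls i).zip
        ((ls.map (fun l => PySem.Str.startswith (PySem.Str.strip l) "```")).zip
         ((ls.map (fun l => PySem.Str.startswith (PySem.Str.strip l) "```")).scanl
            (fun n b => n + (if b then 1 else 0)) c))).filterMap pvKeep := by
  intro ls
  induction ls with
  | nil => intro i c acc; simp [PySem.List.enumerate]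
  | cons l ls ih =>
    intro i c acc
    rw [PySem.List.enumerate_cons, List.map_cons, List.scanl_cons, List.zip_cons_cons,
      List.zip_cons_cons, List.foldl_cons, List.filterMap_cons]
    by_cases hf : PySem.Chars.startswith (PySem.Chars.strip l.toList) ['`', '`', '`'] = true
    · have h1 := ih (i + 1) (c + 1) acc
      rw [pv_parity] at h1
      simpa [hf, pvKeep] using h1
    · have hf' : PySem.Chars.startswith (PySem.Chars.strip l.toList) ['`', '`', '`'] = false := by simpa using hf
      rcases Nat.mod_two_eq_zero_or_one c with hc | hc
      · have h1 := ih (i + 1) c (acc ++ [(i, l)])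
        simp only [hc] at h1 ⊢
        simpa [hf', pvKeep, hc] using h1
      · have h1 := ih (i + 1) c acc
        simp only [hc] at h1 ⊢
        simpa [hf', pvKeep, hc] using h1

-- ===== VERDICT (by name: the statement is the Claim_ definition above) =====
theorem iter_non_fenced_lines_py_spec : Claim_equal_iter_non_fenced_lines_py := by
  intro text _
  show iter_non_fenced_lines_py text = iter_non_fenced_lines_py_alt text
  unfold iter_non_fenced_lines_py iter_non_fenced_lines_py_alt
  have h := pv_core (PySem.Str.splitlines text) 1 0 []
  have h0 : ((0 % 2 == 1) : Bool) = false := rfl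
  rw [h0, List.nil_append] at h
  exact h
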